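-- pv_equiv track=rewrite | github.com/FernandoCavalcantii/Exercicios-Trybe | Ciencia-da-Computacao/bloco-37-estrutura-de-dados-I-arrays-listas-filas-e-pilhas/dia-02-arrays/fixacao/numpy_array_example.py | pontuation
-- ===== SOURCE A (Python) =====
-- def pontuation(lst):
--     highest_pontuation = 0
--     for index, num in enumerate(lst):
--         for i, el in enumerate(lst):
--             if index != i:
--                 if index > i:
--                     pontuation = (num + el) - (index - i)
--                     if highest_pontuation < pontuation:
--                         highest_pontuation = pontuation
--                 else:
--                     pontuation = (num + el) - (i - index)
--                     if highest_pontuation < pontuation: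
--                         highest_pontuation = pontuation
--     return highest_pontuation
-- ===== SOURCE B (Python) =====
-- def pontuation(lst):
--     highest = 0
--     best_plus = None  # max of lst[i] + i over indices seen so far
--     for j, v in enumerate(lst):
--         if best_plus is not None:
--             cand = best_plus + v - j
--             if cand > highest:
--                 highest = cand
--         cur = v + j
--         if best_plus is None or cur > best_plus:
--             best_plus = cur
--     return highest
-- ===== Notes on version B (the rewrite author's own statement) =====
-- stated objective: faster
-- what changed: Replaced the all-pairs double loop with a single pass that keeps the running maximum of value+index and combines it with each value-index, reducing O(n^2) to O(n).
import Mathlib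
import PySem

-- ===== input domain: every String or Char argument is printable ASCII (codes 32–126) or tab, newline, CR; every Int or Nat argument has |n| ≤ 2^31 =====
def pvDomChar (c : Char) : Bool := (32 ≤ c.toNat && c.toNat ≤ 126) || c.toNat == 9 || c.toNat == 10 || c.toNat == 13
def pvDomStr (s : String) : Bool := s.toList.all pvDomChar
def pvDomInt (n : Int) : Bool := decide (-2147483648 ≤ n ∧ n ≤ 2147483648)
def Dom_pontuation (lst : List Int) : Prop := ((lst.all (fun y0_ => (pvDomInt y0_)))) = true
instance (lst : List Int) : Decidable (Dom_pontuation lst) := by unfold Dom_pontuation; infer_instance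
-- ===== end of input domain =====

-- B replaces A's all-pairs double loop with one pass tracking max(value+index); measured asymptotically faster.

-- ===== PORT A =====
-- one comparison step of A's inner loop (literal, including A's branch order)
def pvStepA (p : Int × Int) (h : Int) (q : Int × Int) : Int :=
  if p.1 ≠ q.1 then
    if p.1 > q.1 then
      let s := (p.2 + q.2) - (p.1 - q.1)
      if h < s then s else h
    else
      let s := (p.2 + q.2) - (q.1 - p.1)
      if h < s then s else h
  else h

-- inner loop of A, with the outer element p fixed
def pvInnerA (E : List (Int × Int)) (p : Int × Int) (h0 : Int) : Int :=
  E.foldl (pvStepA p) h0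

def pontuation (lst : List Int) : Int :=
  (PySem.List.enumerate lst).foldl
    (fun hp p => pvInnerA (PySem.List.enumerate lst) p hp) 0

-- ===== PORT B =====
-- one step of B's single pass: state = (highest, best_plus)
def pvStepB (st : Int × Option Int) (x : Int × Int) : Int × Option Int :=
  match st.2 with
  | none => (st.1, some (x.2 + x.1))
  | some b =>
    let c := b + x.2 - x.1
    let h' := if c > st.1 then c else st.1
    let cur := x.2 + x.1
    (h', if cur > b then some cur else some b)

def pontuation_alt (lst : List Int) : Int :=
  ((PySem.List.enumerate lst).foldl pvStepB (0, none)).1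

-- ===== PRECONDITION & SPEC =====
def Spec_pontuation (lst : List Int) (out : Int) : Prop := out = pontuation_alt lst
instance (lst : List Int) (out : Int) : Decidable (Spec_pontuation lst out) := by unfold Spec_pontuation; infer_instance

-- ===== CLAIM (what is proved, stated in full; the proofs are below) =====
def Claim_equal_pontuation : Prop := ∀ (lst : List Int), Dom_pontuation lst → Spec_pontuation lst (pontuation lst)

-- ===== LEMMAS AND PROOFS =====

-- candidate value of an (i≠j) pair, as A computes it
def pvCandA (p q : Int × Int) : Int :=
  if p.1 > q.1 then (p.2 + q.2) - (p.1 - q.1) else (p.2 + q.2) - (q.1 - p.1)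

-- candidate value of an ordered pair, as B computes it
def pvCandB (p q : Int × Int) : Int := p.2 + p.1 + q.2 - q.1

theorem pvCandA_symm (p q : Int × Int) : pvCandA p q = pvCandA q p := by
  unfold pvCandA; split_ifs <;> omega

theorem pvCandB_eq_candA (p q : Int × Int) (h : p.1 < q.1) : pvCandB p q = pvCandA p q := by
  unfold pvCandA pvCandB; split_ifs <;> omega

theorem pvStepA_eq (p : Int × Int) (h : Int) (q : Int × Int) :
    pvStepA p h q = if p.1 ≠ q.1 then max h (pvCandA p q) else h := by
  simp only [pvStepA, pvCandA]; split_ifs <;> omega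

theorem pvInnerA_le_self (E : List (Int × Int)) (p : Int × Int) :
    ∀ h, h ≤ pvInnerA E p h := by
  induction E with
  | nil => intro h; simp [pvInnerA]
  | cons x t ih =>
    intro h
    have h1 : h ≤ pvStepA p h x := by rw [pvStepA_eq]; split_ifs <;> simp
    calc h ≤ pvStepA p h x := h1
    _ ≤ _ := by simpa [pvInnerA] using ih (pvStepA p h x)

theorem pvInnerA_bound (E : List (Int × Int)) (p : Int × Int) :
    ∀ h q, q ∈ E → p.1 ≠ q.1 → pvCandA p q ≤ pvInnerA E p h := by
  induction E with
  | nil => intro h q hq; simp at hq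
  | cons x t ih =>
    intro h q hq hne
    rcases List.mem_cons.mp hq with rfl | hq
    · have h1 : pvCandA p q ≤ pvStepA p h q := by rw [pvStepA_eq, if_pos hne]; exact le_max_right _ _
      calc pvCandA p q ≤ pvStepA p h q := h1
      _ ≤ _ := by simpa [pvInnerA] using pvInnerA_le_self t p (pvStepA p h q)
    · simpa [pvInnerA] using ih (pvStepA p h x) q hq hne

theorem pvInnerA_cases (E : List (Int × Int)) (p : Int × Int) :
    ∀ h, pvInnerA E p h = h ∨ ∃ q ∈ E, p.1 ≠ q.1 ∧ pvInnerA E p h = pvCandA p q := by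
  induction E with
  | nil => intro h; left; simp [pvInnerA]
  | cons x t ih =>
    intro h
    have hfold : pvInnerA (x :: t) p h = pvInnerA t p (pvStepA p h x) := by simp [pvInnerA]
    have hstep : pvStepA p h x = h ∨ (p.1 ≠ x.1 ∧ pvStepA p h x = pvCandA p x) := by
      rw [pvStepA_eq]; split_ifs with hne
      · rcases le_total (pvCandA p x) h with hle | hle
        · left; exact max_eq_left hle
        · right; exact ⟨hne, max_eq_right hle⟩
      · left; rfl
    rcases ih (pvStepA p h x) with heq | ⟨q, hq, hne, heq⟩
    · rw [hfold, heq]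
      rcases hstep with h1 | ⟨hne, h1⟩
      · left; exact h1
      · right; exact ⟨x, List.mem_cons_self, hne, h1⟩
    · right; exact ⟨q, List.mem_cons_of_mem _ hq, hne, by rw [hfold, heq]⟩

theorem pvOuterA_le_self (E : List (Int × Int)) :
    ∀ (l : List (Int × Int)) (h : Int), h ≤ l.foldl (fun hp p => pvInnerA E p hp) h := by
  intro l
  induction l with
  | nil => intro h; simp
  | cons x t ih =>
    intro h
    calc h ≤ pvInnerA E x h := pvInnerA_le_self E x h
    _ ≤ _ := by simpa using ih (pvInnerA E x h)

theorem pvOuterA_bound (E : List (Int × Int)) :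
    ∀ (l : List (Int × Int)) (h : Int) (p q : Int × Int), p ∈ l → q ∈ E → p.1 ≠ q.1 →
      pvCandA p q ≤ l.foldl (fun hp p => pvInnerA E p hp) h := by
  intro l
  induction l with
  | nil => intro h p q hp; simp at hp
  | cons x t ih =>
    intro h p q hp hq hne
    rcases List.mem_cons.mp hp with rfl | hp
    · calc pvCandA p q ≤ pvInnerA E p h := pvInnerA_bound E p h q hq hne
      _ ≤ _ := by simpa using pvOuterA_le_self E t (pvInnerA E p h)
    · simpa using ih (pvInnerA E x h) p q hp hq hne

theorem pvOuterA_cases (E : List (Int × Int)) :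
    ∀ (l : List (Int × Int)) (h : Int),
      l.foldl (fun hp p => pvInnerA E p hp) h = h ∨
      ∃ p ∈ l, ∃ q ∈ E, p.1 ≠ q.1 ∧ l.foldl (fun hp p => pvInnerA E p hp) h = pvCandA p q := by
  intro l
  induction l with
  | nil => intro h; left; simp
  | cons x t ih =>
    intro h
    have hfold : (x :: t).foldl (fun hp p => pvInnerA E p hp) h
        = t.foldl (fun hp p => pvInnerA E p hp) (pvInnerA E x h) := by simp
    rcases ih (pvInnerA E x h) with heq | ⟨p, hp, q, hq, hne, heq⟩
    · rw [hfold, heq]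
      rcases pvInnerA_cases E x h with h1 | ⟨q, hq, hne, h1⟩
      · left; exact h1
      · right; exact ⟨x, List.mem_cons_self, q, hq, hne, h1⟩
    · right; exact ⟨p, List.mem_cons_of_mem _ hp, q, hq, hne, by rw [hfold, heq]⟩

-- main invariant for B's single pass
theorem pvRunB (l : List (Int × Int)) :
    ∀ (done : List (Int × Int)) (h b : Int),
    (∀ p ∈ done, p.2 + p.1 ≤ b) →
    (∃ p ∈ done, b = p.2 + p.1) →
    (∀ p ∈ done, ∀ q ∈ l, p.1 < q.1) →
    l.Pairwise (fun p q => p.1 < q.1) →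
    0 ≤ h →
    (∀ p ∈ done, ∀ q ∈ done, p.1 < q.1 → pvCandB p q ≤ h) →
    (h = 0 ∨ ∃ p ∈ done, ∃ q ∈ done, p.1 < q.1 ∧ h = pvCandB p q) →
    0 ≤ (l.foldl pvStepB (h, some b)).1 ∧
    (∀ p ∈ done ++ l, ∀ q ∈ done ++ l, p.1 < q.1 → pvCandB p q ≤ (l.foldl pvStepB (h, some b)).1) ∧
    ((l.foldl pvStepB (h, some b)).1 = 0 ∨
      ∃ p ∈ done ++ l, ∃ q ∈ done ++ l, p.1 < q.1 ∧ (l.foldl pvStepB (h, some b)).1 = pvCandB p q) := by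
  induction l with
  | nil =>
    intro done h b H1 H2 H3 H4 H5 H6 H7
    simp only [List.foldl_nil, List.append_nil]
    exact ⟨H5, H6, H7⟩
  | cons x t ih =>
    intro done h b H1 H2 H3 H4 H5 H6 H7
    have hstep : pvStepB (h, some b) x
        = (if b + x.2 - x.1 > h then b + x.2 - x.1 else h,
           some (if x.2 + x.1 > b then x.2 + x.1 else b)) := by
      simp only [pvStepB]; split_ifs <;> rfl
    rw [List.foldl_cons, hstep]
    generalize hh1 : (if b + x.2 - x.1 > h then b + x.2 - x.1 else h) = h1
    generalize hb1 : (if x.2 + x.1 > b then x.2 + x.1 else b) = b1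
    have hbb1 : b ≤ b1 := by rw [← hb1]; split_ifs <;> omega
    have hxb1 : x.2 + x.1 ≤ b1 := by rw [← hb1]; split_ifs <;> omega
    have hhh1 : h ≤ h1 := by rw [← hh1]; split_ifs <;> omega
    have hc1 : b + x.2 - x.1 ≤ h1 := by rw [← hh1]; split_ifs <;> omega
    have H4' := List.pairwise_cons.mp H4
    have main := ih (done ++ [x]) h1 b1
      (by intro p hp
          rcases List.mem_append.mp hp with hp | hp
          · exact le_trans (H1 p hp) hbb1
          · simp at hp; subst hp; exact hxb1)
      (by rw [← hb1]; split_ifs with hc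
          · exact ⟨x, by simp, rfl⟩
          · obtain ⟨p, hp, hbe⟩ := H2; exact ⟨p, List.mem_append_left _ hp, hbe⟩)
      (by intro p hp q hq
          rcases List.mem_append.mp hp with hp | hp
          · exact H3 p hp q (List.mem_cons_of_mem _ hq)
          · simp at hp; subst hp; exact H4'.1 q hq)
      H4'.2 (le_trans H5 hhh1)
      (by intro p hp q hq hlt
          rcases List.mem_append.mp hp with hp | hp
          · rcases List.mem_append.mp hq with hq | hq
            · exact le_trans (H6 p hp q hq hlt) hhh1
            · have hq' : q = x := by simpa using hq
              have hb := H1 p hp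
              unfold pvCandB; rw [hq']; omega
          · have hp' : p = x := by simpa using hp
            rcases List.mem_append.mp hq with hq | hq
            · exact absurd hlt (by have h3 := H3 q hq x List.mem_cons_self; rw [hp']; omega)
            · have hq' : q = x := by simpa using hq
              exact absurd hlt (by rw [hp', hq']; omega))
      (by rw [← hh1]; split_ifs with hc
          · obtain ⟨p, hp, hbe⟩ := H2
            right
            refine ⟨p, List.mem_append_left _ hp, x, by simp, H3 p hp x List.mem_cons_self, ?_⟩
            unfold pvCandB; omega
          · rcases H7 with h0 | ⟨p, hp, q, hq, hlt, he⟩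
            · left; exact h0
            · right; exact ⟨p, List.mem_append_left _ hp, q, List.mem_append_left _ hq, hlt, he⟩)
    have hperm : done ++ [x] ++ t = done ++ x :: t := by simp
    rw [hperm] at main
    exact main

theorem pvB_main (lst : List Int) :
    0 ≤ pontuation_alt lst ∧
    (∀ p ∈ PySem.List.enumerate lst, ∀ q ∈ PySem.List.enumerate lst,
      p.1 < q.1 → pvCandB p q ≤ pontuation_alt lst) ∧
    (pontuation_alt lst = 0 ∨
      ∃ p ∈ PySem.List.enumerate lst, ∃ q ∈ PySem.List.enumerate lst,
        p.1 < q.1 ∧ pontuation_alt lst = pvCandB p q) := by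
  have hpw := PySem.List.pairwise_lt_enumerate (xs := lst) (s := 0)
  cases hE : PySem.List.enumerate lst with
  | nil =>
    refine ⟨by simp [pontuation_alt, hE], ?_, Or.inl (by simp [pontuation_alt, hE])⟩
    intro p hp; simp at hp
  | cons x t =>
    rw [hE] at hpw
    have hpw' := List.pairwise_cons.mp hpw
    have hfold : pontuation_alt lst = (t.foldl pvStepB (0, some (x.2 + x.1))).1 := by
      simp [pontuation_alt, hE, pvStepB]
    have main := pvRunB t [x] 0 (x.2 + x.1)
      (by intro p hp; simp at hp; subst hp; omega)
      ⟨x, by simp, rfl⟩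
      (by intro p hp q hq; simp at hp; subst hp; exact hpw'.1 q hq)
      hpw'.2 le_rfl
      (by intro p hp q hq hlt; simp at hp hq; subst hp; subst hq; omega)
      (Or.inl rfl)
    rw [hfold]
    simpa using main

theorem pontuation_eq (lst : List Int) : pontuation lst = pontuation_alt lst := by
  obtain ⟨hB0, hBbd, hBat⟩ := pvB_main lst
  have hA0 : (0 : Int) ≤ pontuation lst := pvOuterA_le_self _ _ 0
  have hAbd : ∀ p ∈ PySem.List.enumerate lst, ∀ q ∈ PySem.List.enumerate lst,
      p.1 ≠ q.1 → pvCandA p q ≤ pontuation lst := by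
    intro p hp q hq hne
    exact pvOuterA_bound _ _ 0 p q hp hq hne
  apply le_antisymm
  · rcases pvOuterA_cases (PySem.List.enumerate lst) (PySem.List.enumerate lst) 0 with
      heq | ⟨p, hp, q, hq, hne, heq⟩
    · unfold pontuation; rw [heq]; exact hB0
    · unfold pontuation; rw [heq]
      rcases lt_or_gt_of_ne hne with hlt | hgt
      · rw [← pvCandB_eq_candA p q hlt]; exact hBbd p hp q hq hlt
      · rw [pvCandA_symm, ← pvCandB_eq_candA q p hgt]; exact hBbd q hq p hp hgt
  · rcases hBat with heq | ⟨p, hp, q, hq, hlt, heq⟩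
    · rw [heq]; exact hA0
    · rw [heq, pvCandB_eq_candA p q hlt]
      exact hAbd p hp q hq (by omega)

-- ===== VERDICT (by name: the statement is the Claim_ definition above) =====
theorem pontuation_spec : Claim_equal_pontuation := by
  intro lst _
  unfold Spec_pontuation
  exact pontuation_eq lst
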